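-- pv_equiv track=rewrite | github.com/adalsteinnpals/stockfish_explain | utils.py | reduce_piece_map
-- ===== SOURCE A (Python) =====
-- import copy
--
-- def reduce_piece_map(map, list_pieces=["p", "b", "n", "r", "q"], color=None):
--     _map = copy.copy(map)
--     _chosen_map = {}
--     for key, value in map.items():
--         if str(value).lower() in list_pieces:
--             if color is None:
--                 del _map[key]
--                 _chosen_map[key] = value
--             elif (color == "white") and (str(value).isupper()):
--                 del _map[key]
--                 _chosen_map[key] = value
--             elif (color == "black") and (str(value).islower()):
--                 del _map[key]
--                 _chosen_map[key] = value
--     return _chosen_map, _map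
-- ===== SOURCE B (Python) =====
-- def _keep(value, list_pieces, color):
--     if str(value).lower() not in list_pieces:
--         return False
--     if color is None:
--         return True
--     if color == "white":
--         return str(value).isupper()
--     if color == "black":
--         return str(value).islower()
--     return False
--
--
-- def reduce_piece_map(map, list_pieces=["p", "b", "n", "r", "q"], color=None):
--     chosen = {k: v for k, v in map.items() if _keep(v, list_pieces, color)}
--     remaining = {k: v for k, v in map.items() if not _keep(v, list_pieces, color)}
--     return chosen, remaining
-- ===== Notes on version B (the rewrite author's own statement) =====
-- stated objective: simpler
-- what changed: B builds the chosen and remaining dicts from scratch with two filtering comprehensions over the items in one predicate, instead of copying the whole map and deleting matched keys one by one as A does.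
import Mathlib
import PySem

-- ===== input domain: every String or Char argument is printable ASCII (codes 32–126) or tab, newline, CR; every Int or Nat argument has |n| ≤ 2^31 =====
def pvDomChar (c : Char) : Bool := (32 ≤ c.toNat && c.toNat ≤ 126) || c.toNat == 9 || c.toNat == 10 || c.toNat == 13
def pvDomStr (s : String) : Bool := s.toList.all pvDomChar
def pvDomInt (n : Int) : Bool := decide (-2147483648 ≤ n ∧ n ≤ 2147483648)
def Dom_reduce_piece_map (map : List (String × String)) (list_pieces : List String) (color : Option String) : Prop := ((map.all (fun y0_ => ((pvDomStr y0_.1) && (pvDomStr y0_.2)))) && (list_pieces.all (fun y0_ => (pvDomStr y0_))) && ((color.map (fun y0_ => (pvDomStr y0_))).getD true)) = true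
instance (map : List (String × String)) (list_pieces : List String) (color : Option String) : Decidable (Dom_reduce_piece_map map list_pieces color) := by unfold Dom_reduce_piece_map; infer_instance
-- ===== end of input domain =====

-- B builds the two result dicts directly by filtering (two comprehensions) instead of
-- copying the map and deleting matched keys one by one; objective: simpler.

-- ===== PORT A =====
-- str.isupper()/str.islower() on a whole string, exact on the printable-ASCII domain:
-- no lowercase (resp. uppercase) cased character and at least one cased character.
def pvIsUpperStr (s : String) : Bool :=
  s.toList.all (fun c => !PySem.Chars.islower c) && s.toList.any PySem.Chars.isupper

def pvIsLowerStr (s : String) : Bool :=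
  s.toList.all (fun c => !PySem.Chars.isupper c) && s.toList.any PySem.Chars.islower

-- the body of A's for-loop, acting on (_map, _chosen_map)
def pvStepA (list_pieces : List String) (color : Option String)
    (st : PySem.Dict String String × PySem.Dict String String) (kv : String × String) :
    PySem.Dict String String × PySem.Dict String String :=
  if list_pieces.contains (PySem.Str.lower kv.2) then
    if color = none then (st.1.erase kv.1, st.2.insert kv.1 kv.2)
    else if decide (color = some "white") && pvIsUpperStr kv.2 then
      (st.1.erase kv.1, st.2.insert kv.1 kv.2)
    else if decide (color = some "black") && pvIsLowerStr kv.2 then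
      (st.1.erase kv.1, st.2.insert kv.1 kv.2)
    else st
  else st

def reduce_piece_map (map : List (String × String)) (list_pieces : List String) (color : Option String) : (List (String × String)) × (List (String × String)) :=
  let r := map.foldl (pvStepA list_pieces color) (⟨map⟩, ⟨[]⟩)
  (r.2.items, r.1.items)

-- ===== PORT B =====
def pvKeep (list_pieces : List String) (color : Option String) (value : String) : Bool :=
  if !(list_pieces.contains (PySem.Str.lower value)) then false
  else
    match color with
    | none => true
    | some c =>
      if c = "white" then pvIsUpperStr value
      else if c = "black" then pvIsLowerStr value
      else false

def reduce_piece_map_alt (map : List (String × String)) (list_pieces : List String) (color : Option String) : (List (String × String)) × (List (String × String)) :=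
  (map.filter (fun kv => pvKeep list_pieces color kv.2),
   map.filter (fun kv => !pvKeep list_pieces color kv.2))

-- ===== PRECONDITION & SPEC =====
-- Pre_ requires pairwise-distinct keys: the Python argument is a dict, and an association
-- list with duplicate keys does not correspond to any Python dict input.
def Pre_reduce_piece_map (map : List (String × String)) (list_pieces : List String) (color : Option String) : Prop :=
  (map.map Prod.fst).Nodup

instance (map : List (String × String)) (list_pieces : List String) (color : Option String) : Decidable (Pre_reduce_piece_map map list_pieces color) := by unfold Pre_reduce_piece_map; infer_instance

def pvWitness_reduce_piece_map : (List (String × String)) × List String × Option String :=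
  ([("a1", "P"), ("b2", "q"), ("c3", "k")], ["p", "b", "n", "r", "q"], some "white")

def Spec_reduce_piece_map (map : List (String × String)) (list_pieces : List String) (color : Option String) (out : (List (String × String)) × (List (String × String))) : Prop := out = reduce_piece_map_alt map list_pieces color
instance (map : List (String × String)) (list_pieces : List String) (color : Option String) (out : (List (String × String)) × (List (String × String))) : Decidable (Spec_reduce_piece_map map list_pieces color out) := by unfold Spec_reduce_piece_map; infer_instance

-- ===== CLAIM (what is proved, stated in full; the proofs are below) =====
def Claim_equal_reduce_piece_map : Prop := ∀ (map : List (String × String)) (list_pieces : List String) (color : Option String), Dom_reduce_piece_map map list_pieces color → Pre_reduce_piece_map map list_pieces color → Spec_reduce_piece_map map list_pieces color (reduce_piece_map map list_pieces color)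

-- ===== LEMMAS AND PROOFS =====

-- A's branch chain decides exactly pvKeep
theorem pvStepA_eq (list_pieces : List String) (color : Option String)
    (st : PySem.Dict String String × PySem.Dict String String) (kv : String × String) :
    pvStepA list_pieces color st kv =
      if pvKeep list_pieces color kv.2 then (st.1.erase kv.1, st.2.insert kv.1 kv.2) else st := by
  unfold pvStepA pvKeep
  cases color with
  | none => split_ifs <;> simp_all
  | some c => split_ifs <;> simp_all

-- loop invariant: after processing `done`, _map = done.filter (¬keep) ++ rest, chosen = done.filter keep
theorem loopA (list_pieces : List String) (color : Option String) :
    ∀ (rest done : List (String × String)),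
      (((done ++ rest).map Prod.fst).Nodup) →
      rest.foldl (pvStepA list_pieces color)
        (⟨done.filter (fun kv => !pvKeep list_pieces color kv.2) ++ rest⟩,
         ⟨done.filter (fun kv => pvKeep list_pieces color kv.2)⟩)
      = (⟨(done ++ rest).filter (fun kv => !pvKeep list_pieces color kv.2)⟩,
         ⟨(done ++ rest).filter (fun kv => pvKeep list_pieces color kv.2)⟩) := by
  intro rest
  induction rest with
  | nil => intro done h; simp [List.filter_append]
  | cons kv rest' ih =>
    intro done h
    obtain ⟨h1, h2, h3⟩ := List.nodup_append.mp (by simpa [List.map_append] using h)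
    have hk_rest : kv.1 ∉ rest'.map Prod.fst := (List.nodup_cons.mp h2).1
    have hk_done : kv.1 ∉ done.map Prod.fst := fun hm => h3 kv.1 hm kv.1 (List.mem_cons_self ..) rfl
    have hnd' : (((done ++ [kv]) ++ rest').map Prod.fst).Nodup := by
      simpa [List.append_assoc] using h
    have hq_done : ∀ q ∈ done, (q.1 == kv.1) = false := by
      intro q hq
      exact beq_eq_false_iff_ne.mpr (fun he => hk_done (List.mem_map.mpr ⟨q, hq, he⟩))
    have hq_rest : ∀ q ∈ rest', (q.1 == kv.1) = false := by
      intro q hq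
      exact beq_eq_false_iff_ne.mpr (fun he => hk_rest (List.mem_map.mpr ⟨q, hq, he⟩))
    simp only [List.foldl_cons, pvStepA_eq]
    by_cases hp : pvKeep list_pieces color kv.2
    · rw [if_pos hp]
      have herase : PySem.Dict.erase
          (⟨done.filter (fun q => !pvKeep list_pieces color q.2) ++ kv :: rest'⟩ : PySem.Dict String String) kv.1
          = ⟨(done ++ [kv]).filter (fun q => !pvKeep list_pieces color q.2) ++ rest'⟩ := by
        have e1 : (done.filter (fun q => !pvKeep list_pieces color q.2)).filter
            (fun q : String × String => !(q.1 == kv.1)) = done.filter (fun q => !pvKeep list_pieces color q.2) :=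
          List.filter_eq_self.mpr (fun q hq => by simp [hq_done q (List.mem_of_mem_filter hq)])
        have e2 : rest'.filter (fun q : String × String => !(q.1 == kv.1)) = rest' :=
          List.filter_eq_self.mpr (fun q hq => by simp [hq_rest q hq])
        simp [PySem.Dict.erase, List.filter_append, List.filter_cons, e1, e2, hp]
      have hinsert : PySem.Dict.insert
          (⟨done.filter (fun q => pvKeep list_pieces color q.2)⟩ : PySem.Dict String String) kv.1 kv.2
          = ⟨(done ++ [kv]).filter (fun q => pvKeep list_pieces color q.2)⟩ := by
        have hcont : (⟨done.filter (fun q => pvKeep list_pieces color q.2)⟩ : PySem.Dict String String).contains kv.1 = false := by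
          simp only [PySem.Dict.contains, List.any_eq_false]
          intro q hq
          simp [hq_done q (List.mem_of_mem_filter hq)]
        simp [PySem.Dict.insert, hcont, List.filter_append, List.filter_cons, hp]
      rw [herase, hinsert, ih (done ++ [kv]) hnd']
      simp [List.append_assoc]
    · rw [if_neg hp]
      have hmapeq : done.filter (fun q => !pvKeep list_pieces color q.2) ++ kv :: rest'
          = (done ++ [kv]).filter (fun q => !pvKeep list_pieces color q.2) ++ rest' := by
        simp [List.filter_append, hp]
      have hchoseneq : done.filter (fun q => pvKeep list_pieces color q.2)
          = (done ++ [kv]).filter (fun q => pvKeep list_pieces color q.2) := by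
        simp [List.filter_append, List.filter_cons, hp]
      rw [show (⟨done.filter (fun q => !pvKeep list_pieces color q.2) ++ kv :: rest'⟩ : PySem.Dict String String)
            = ⟨(done ++ [kv]).filter (fun q => !pvKeep list_pieces color q.2) ++ rest'⟩ from by rw [hmapeq],
          show (⟨done.filter (fun q => pvKeep list_pieces color q.2)⟩ : PySem.Dict String String)
            = ⟨(done ++ [kv]).filter (fun q => pvKeep list_pieces color q.2)⟩ from by rw [hchoseneq],
          ih (done ++ [kv]) hnd']
      simp [List.append_assoc]

theorem reduce_piece_map_spec : Claim_equal_reduce_piece_map := by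
  intro map list_pieces color _ hpre
  unfold Spec_reduce_piece_map reduce_piece_map reduce_piece_map_alt
  have := loopA list_pieces color map []
  simp only [List.nil_append, List.filter_nil] at this
  rw [this hpre]
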